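-- pv_equiv track=rewrite | github.com/12-SNU-Project/LLM_Project | src/승담_수비/prototype/core/table_processor.py | _stabilize_row_depth
-- ===== SOURCE A (Python) =====
-- from typing import Any, Dict, List, Optional, Set, Tuple
--
-- def _stabilize_row_depth(raw_depth: int, parent_stack: Dict[int, str]) -> int:
--     if raw_depth <= 0 or not parent_stack:
--         return 0 if raw_depth <= 0 else min(raw_depth, 1)
--     max_existing = max(parent_stack.keys())
--     stabilized = min(raw_depth, max_existing + 1)
--     while stabilized > 0 and (stabilized - 1) not in parent_stack:
--         stabilized -= 1
--     return max(0, stabilized)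
-- ===== SOURCE B (Python) =====
-- def _stabilize_row_depth(raw_depth: int, parent_stack: dict) -> int:
--     if raw_depth <= 0:
--         return 0
--     if not parent_stack:
--         return min(raw_depth, 1)
--     cap = min(raw_depth, max(parent_stack.keys()) + 1)
--     return max((k + 1 for k in parent_stack if 0 <= k < cap), default=0)
-- ===== Notes on version B (the rewrite author's own statement) =====
-- stated objective: simpler
-- what changed: Replaces the one-step decrement while-loop with a single pass over the dict keys taking the maximum valid candidate depth max(k+1 for k in keys if 0 <= k < cap, default=0).
import Mathlib
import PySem

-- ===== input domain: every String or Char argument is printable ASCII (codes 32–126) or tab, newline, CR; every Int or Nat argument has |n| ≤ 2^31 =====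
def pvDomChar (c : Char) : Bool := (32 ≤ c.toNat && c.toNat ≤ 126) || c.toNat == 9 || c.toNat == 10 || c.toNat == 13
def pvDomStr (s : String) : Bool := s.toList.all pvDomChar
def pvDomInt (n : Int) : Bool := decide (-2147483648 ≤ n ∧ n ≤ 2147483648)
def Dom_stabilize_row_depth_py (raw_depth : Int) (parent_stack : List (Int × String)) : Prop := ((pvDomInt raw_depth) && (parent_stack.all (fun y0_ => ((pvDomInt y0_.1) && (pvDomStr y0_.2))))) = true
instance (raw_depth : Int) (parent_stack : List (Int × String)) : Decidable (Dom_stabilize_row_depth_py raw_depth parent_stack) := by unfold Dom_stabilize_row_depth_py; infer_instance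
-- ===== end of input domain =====

-- B replaces A's one-step decrement while-loop by one pass over the keys taking the
-- maximum valid candidate depth (simpler; same return value everywhere).

-- ===== PORT A =====
-- the while-loop: while stabilized > 0 and (stabilized - 1) not in parent_stack: stabilized -= 1
def pvALoop (keys : List Int) (s : Int) : Int :=
  if h : 0 < s ∧ ¬ (s - 1) ∈ keys then pvALoop keys (s - 1) else s
termination_by s.toNat
decreasing_by omega

def stabilize_row_depth_py (raw_depth : Int) (parent_stack : List (Int × String)) : Int :=
  if raw_depth ≤ 0 ∨ parent_stack = [] then
    (if raw_depth ≤ 0 then 0 else min raw_depth 1)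
  else
    -- max(parent_stack.keys()); the list is nonempty here, so the getD default is unreachable
    let max_existing := (PySem.List.max? (parent_stack.map Prod.fst) (fun k => k)).getD 0
    let stabilized := min raw_depth (max_existing + 1)
    max 0 (pvALoop (parent_stack.map Prod.fst) stabilized)

-- ===== PORT B =====
def stabilize_row_depth_py_alt (raw_depth : Int) (parent_stack : List (Int × String)) : Int :=
  if raw_depth ≤ 0 then 0
  else if parent_stack = [] then min raw_depth 1
  else
    let cap := min raw_depth (((PySem.List.max? (parent_stack.map Prod.fst) (fun k => k)).getD 0) + 1)
    -- max((k + 1 for k in parent_stack if 0 <= k < cap), default=0)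
    PySem.List.maxD
      (((parent_stack.map Prod.fst).filter (fun k => decide (0 ≤ k ∧ k < cap))).map (· + 1))
      (fun x => x) 0

-- ===== PRECONDITION & SPEC =====
def Spec_stabilize_row_depth_py (raw_depth : Int) (parent_stack : List (Int × String)) (out : Int) : Prop := out = stabilize_row_depth_py_alt raw_depth parent_stack
instance (raw_depth : Int) (parent_stack : List (Int × String)) (out : Int) : Decidable (Spec_stabilize_row_depth_py raw_depth parent_stack out) := by unfold Spec_stabilize_row_depth_py; infer_instance

-- ===== CLAIM (what is proved, stated in full; the proofs are below) =====
def Claim_equal_stabilize_row_depth_py : Prop := ∀ (raw_depth : Int) (parent_stack : List (Int × String)), Dom_stabilize_row_depth_py raw_depth parent_stack → Spec_stabilize_row_depth_py raw_depth parent_stack (stabilize_row_depth_py raw_depth parent_stack)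

-- ===== LEMMAS AND PROOFS =====

-- B's candidate maximum, as a function of the cap s
def pvBest (keys : List Int) (s : Int) : Int :=
  PySem.List.maxD ((keys.filter (fun k => decide (0 ≤ k ∧ k < s))).map (· + 1)) (fun x => x) 0

lemma pvBest_zero (keys : List Int) (s : Int) (hs : s ≤ 0) : pvBest keys s = 0 := by
  unfold pvBest
  have h : keys.filter (fun k => decide (0 ≤ k ∧ k < s)) = [] := by
    simp only [List.filter_eq_nil_iff]
    intro k _
    simp only [decide_eq_true_eq, not_and, not_lt]
    omega
  rw [h]
  rfl

lemma pvBest_shift (keys : List Int) (s : Int) (hmem : ¬ (s - 1) ∈ keys) :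
    pvBest keys s = pvBest keys (s - 1) := by
  unfold pvBest
  have h : keys.filter (fun k => decide (0 ≤ k ∧ k < s))
         = keys.filter (fun k => decide (0 ≤ k ∧ k < s - 1)) := by
    apply List.filter_congr
    intro k hk
    have hne : k ≠ s - 1 := fun he => hmem (he ▸ hk)
    simp only [decide_eq_decide]
    omega
  rw [h]

lemma pvBest_hit (keys : List Int) (s : Int) (hpos : 0 < s) (hmem : (s - 1) ∈ keys) :
    pvBest keys s = s := by
  unfold pvBest
  have hsl : s ∈ (keys.filter (fun k => decide (0 ≤ k ∧ k < s))).map (· + 1) := by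
    simp only [List.mem_map, List.mem_filter]
    exact ⟨s - 1, ⟨hmem, by simp only [decide_eq_true_eq]; omega⟩, by ring⟩
  have hub : ∀ x ∈ (keys.filter (fun k => decide (0 ≤ k ∧ k < s))).map (· + 1), x ≤ s := by
    intro x hx
    simp only [List.mem_map, List.mem_filter] at hx
    obtain ⟨k, ⟨-, hk⟩, rfl⟩ := hx
    simp only [decide_eq_true_eq] at hk
    omega
  cases hl : (keys.filter (fun k => decide (0 ≤ k ∧ k < s))).map (· + 1) with
  | nil => rw [hl] at hsl; cases hsl
  | cons c t =>
      rw [hl] at hsl hub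
      have hq := PySem.List.max?_id_cons c t
      have hm : t.foldl max c ∈ c :: t := PySem.List.max?_mem hq
      have hmax := PySem.List.max?_isMax hq
      simp only [PySem.List.maxD, hq, Option.getD_some]
      exact le_antisymm (hub _ hm) (hmax s hsl)

lemma pvALoop_eq_pvBest (keys : List Int) (s : Int) :
    max 0 (pvALoop keys s) = pvBest keys s := by
  induction s using pvALoop.induct keys with
  | case1 s h ih =>
      rw [pvALoop, dif_pos h, ih, pvBest_shift keys s h.2]
  | case2 s h =>
      rw [pvALoop, dif_neg h]
      rcases not_and_or.mp h with hs | hmem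
      · rw [pvBest_zero keys s (by omega)]; omega
      · rw [not_not] at hmem
        by_cases hpos : 0 < s
        · rw [pvBest_hit keys s hpos hmem]; omega
        · rw [pvBest_zero keys s (by omega)]; omega

-- ===== VERDICT (by name: the statement is the Claim_ definition above) =====
theorem stabilize_row_depth_py_spec : Claim_equal_stabilize_row_depth_py := by
  intro raw_depth parent_stack _
  unfold Spec_stabilize_row_depth_py stabilize_row_depth_py stabilize_row_depth_py_alt
  by_cases h0 : raw_depth ≤ 0
  · simp [h0]
  · by_cases he : parent_stack = []
    · simp [h0, he]
    · simp only [h0, he, or_self, if_neg, not_false_iff]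
      exact pvALoop_eq_pvBest (parent_stack.map Prod.fst)
        (min raw_depth (((PySem.List.max? (parent_stack.map Prod.fst) (fun k => k)).getD 0) + 1)) ▸ rfl
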